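-- pv_equiv track=rewrite | github.com/Lucas544875/Post-Correspondence-Problem-of-sushi | pcp-solver/search_constrained_pcp.py | _generate_initial_pairs
-- ===== SOURCE A (Python) =====
-- import itertools
-- from typing import List, Tuple, Dict, Optional
--
-- def _generate_initial_pairs(chars: List[str], max_len: int):
--     """初期文字列ペアの生成"""
--     strings = ['']
--     for length in range(1, max_len + 1):
--         for combo in itertools.product(chars, repeat=length):
--             strings.append(''.join(combo))
--
--     for top in strings:
--         for bottom in strings:
--             # 興味深い組み合わせのみ選択
--             if len(top) + len(bottom) <= 3:  # 合計長制限
--                 yield (top, bottom)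
-- ===== SOURCE B (Python) =====
-- def _generate_initial_pairs(chars, max_len):
--     # Build the same enumeration level by level (each level extends the previous
--     # one), then pre-index the admissible bottoms by remaining length budget so
--     # the pair loop needs no sum filter and its inner loop visits only admissible bottoms.
--     strings = ['']
--     level = ['']
--     for _ in range(max_len):
--         level = [s + c for s in level for c in chars]
--         strings.extend(level)
--     bots = [[s for s in strings if len(s) <= t] for t in range(4)]
--     for top in strings:
--         if len(top) <= 3:
--             for bottom in bots[3 - len(top)]:
--                 yield (top, bottom)
-- ===== Notes on version B (the rewrite author's own statement) =====
-- stated objective: alternative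
-- what changed: B builds each combo level by extending the previous level instead of calling a fresh cartesian product per length, and pre-indexes the admissible bottoms by remaining length budget (lists bots[0..3]) so the pair loop has no sum filter and its inner loop visits only admissible bottoms.
import Mathlib
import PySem

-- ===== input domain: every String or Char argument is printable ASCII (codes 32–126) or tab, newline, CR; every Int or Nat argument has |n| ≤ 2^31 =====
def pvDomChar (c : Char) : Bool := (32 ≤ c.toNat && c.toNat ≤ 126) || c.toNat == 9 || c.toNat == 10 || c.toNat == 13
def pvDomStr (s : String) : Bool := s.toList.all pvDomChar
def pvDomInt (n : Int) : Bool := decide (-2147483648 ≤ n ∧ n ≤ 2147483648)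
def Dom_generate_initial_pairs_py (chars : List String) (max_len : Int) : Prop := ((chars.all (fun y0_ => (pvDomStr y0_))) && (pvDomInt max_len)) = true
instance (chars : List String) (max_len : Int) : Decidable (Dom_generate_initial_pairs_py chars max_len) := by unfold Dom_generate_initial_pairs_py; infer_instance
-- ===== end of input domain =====

-- B restructures A: the combo levels are built by extending the previous level instead of a
-- fresh cartesian product per length, and the admissible bottoms are pre-indexed by remaining
-- length budget so the pair loop has no sum filter and its inner loop visits only admissible bottoms.

-- ===== PORT A =====
-- hand port of "for combo in itertools.product(chars, repeat=length): ''.join(combo)":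
-- the last position varies fastest, i.e. each length-(n+1) list extends the length-n prefixes
-- by one element of chars on the right; exact for tuples of strings joined by ''.
def pvProdJoin (chars : List String) : Nat → List String
  | 0 => [""]
  | n + 1 => (pvProdJoin chars n).flatMap (fun s => chars.map (fun c => s ++ c))

def generate_initial_pairs_py (chars : List String) (max_len : Int) : List (String × String) :=
  let strings : List String :=
    (PySem.List.pyRange 1 (max_len + 1) 1).foldl
      (fun acc length => acc ++ pvProdJoin chars length.toNat) [""]
  strings.flatMap (fun top =>
    strings.flatMap (fun bottom =>
      if PySem.Str.len top + PySem.Str.len bottom ≤ 3 then [(top, bottom)] else []))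

-- ===== PORT B =====
def generate_initial_pairs_py_alt (chars : List String) (max_len : Int) : List (String × String) :=
  let sl : List String × List String :=
    (PySem.List.pyRange 0 max_len 1).foldl
      (fun st _ =>
        let lvl := st.2.flatMap (fun s => chars.map (fun c => s ++ c))
        (st.1 ++ lvl, lvl))
      ([""], [""])
  let strings := sl.1
  let bots : List (List String) :=
    (PySem.List.pyRange 0 4 1).map (fun t => strings.filter (fun s => PySem.Str.len s ≤ t))
  strings.flatMap (fun top =>
    if PySem.Str.len top ≤ 3 then
      (PySem.List.pyGetD bots (3 - PySem.Str.len top) []).map (fun bottom => (top, bottom))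
    else [])

-- ===== PRECONDITION & SPEC =====
def Spec_generate_initial_pairs_py (chars : List String) (max_len : Int) (out : List (String × String)) : Prop := out = generate_initial_pairs_py_alt chars max_len
instance (chars : List String) (max_len : Int) (out : List (String × String)) : Decidable (Spec_generate_initial_pairs_py chars max_len out) := by unfold Spec_generate_initial_pairs_py; infer_instance

-- ===== CLAIM (what is proved, stated in full; the proofs are below) =====
def Claim_equal_generate_initial_pairs_py : Prop := ∀ (chars : List String) (max_len : Int), Dom_generate_initial_pairs_py chars max_len → Spec_generate_initial_pairs_py chars max_len (generate_initial_pairs_py chars max_len)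

-- ===== LEMMAS AND PROOFS =====

-- the level fold of B computes A's strings list, and its level is pvProdJoin n
theorem pv_strings_eq (chars : List String) (n : Nat) :
    (PySem.List.pyRange 0 (n : Int) 1).foldl
      (fun (st : List String × List String) _ =>
        let lvl := st.2.flatMap (fun s => chars.map (fun c => s ++ c))
        (st.1 ++ lvl, lvl))
      ([""], [""])
    = ((PySem.List.pyRange 1 ((n : Int) + 1) 1).foldl
        (fun acc length => acc ++ pvProdJoin chars length.toNat) [""],
       pvProdJoin chars n) := by
  induction n with
  | zero =>
      simp [PySem.List.pyRange_one_eq_nil, pvProdJoin]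
  | succ n ih =>
      have h1 : PySem.List.pyRange 0 ((n : Int) + 1) 1
          = PySem.List.pyRange 0 (n : Int) 1 ++ [(n : Int)] :=
        PySem.List.pyRange_one_succ_right (by positivity)
      have h2 : PySem.List.pyRange 1 (((n : Int) + 1) + 1) 1
          = PySem.List.pyRange 1 ((n : Int) + 1) 1 ++ [(n : Int) + 1] :=
        PySem.List.pyRange_one_succ_right (by omega)
      have htn : ((n : Int) + 1).toNat = n + 1 := by omega
      push_cast
      rw [h1, h2, List.foldl_append, List.foldl_append, ih]
      simp [htn, pvProdJoin]

theorem pv_len_nonneg (s : String) : 0 ≤ PySem.Str.len s := by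
  simp [PySem.Str.len_eq]

-- the inner bottom loop of A equals B's budget-indexed map for one top
theorem pv_inner_eq (L : String → Int) (hL : ∀ s, 0 ≤ L s) (t : String) (S : List String) :
    S.flatMap (fun bottom => if L t + L bottom ≤ 3 then [(t, bottom)] else [])
    = if L t ≤ 3 then
        (S.filter (fun b => decide (L b ≤ 3 - L t))).map (fun b => (t, b))
      else [] := by
  induction S with
  | nil => simp
  | cons b S ih =>
      rw [List.flatMap_cons, ih]
      by_cases h3 : L t ≤ 3
      · rw [if_pos h3, if_pos h3]
        by_cases hc : L t + L b ≤ 3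
        · rw [if_pos hc,
            List.filter_cons_of_pos (by simp only [decide_eq_true_eq]; omega),
            List.map_cons]
          rfl
        · rw [if_neg hc,
            List.filter_cons_of_neg (by simp only [decide_eq_true_eq]; omega),
            List.nil_append]
      · have hc : ¬ (L t + L b ≤ 3) := by have := hL b; omega
        rw [if_neg hc, if_neg h3, if_neg h3, List.nil_append]

-- ===== VERDICT (by name: the statement is the Claim_ definition above) =====
theorem generate_initial_pairs_py_spec : Claim_equal_generate_initial_pairs_py := by
  intro chars max_len _
  unfold Spec_generate_initial_pairs_py generate_initial_pairs_py generate_initial_pairs_py_alt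
  have hrange : PySem.List.pyRange 0 max_len 1
      = PySem.List.pyRange 0 (max_len.toNat : Int) 1 ∧
      PySem.List.pyRange 1 (max_len + 1) 1
      = PySem.List.pyRange 1 ((max_len.toNat : Int) + 1) 1 := by
    rcases (by omega : max_len ≤ 0 ∨ 0 < max_len) with h | h
    · constructor
      · rw [PySem.List.pyRange_one_eq_nil h, PySem.List.pyRange_one_eq_nil (by omega)]
      · rw [PySem.List.pyRange_one_eq_nil (by omega), PySem.List.pyRange_one_eq_nil (by omega)]
    · have : (max_len.toNat : Int) = max_len := by omega
      rw [this]; exact ⟨rfl, rfl⟩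
  rw [hrange.1, hrange.2, pv_strings_eq]
  set S : List String :=
    (PySem.List.pyRange 1 ((max_len.toNat : Int) + 1) 1).foldl
      (fun acc length => acc ++ pvProdJoin chars length.toNat) [""] with hS
  simp only
  refine List.flatMap_congr ?_
  intro t _
  rw [pv_inner_eq PySem.Str.len (fun s => by simp [PySem.Str.len_eq])]
  by_cases h3 : PySem.Str.len t ≤ 3
  · have h0 := pv_len_nonneg t
    rw [if_pos h3, if_pos h3,
      PySem.List.pyGetD_map_pyRange_of_nonneg
        (fun u => S.filter (fun s => decide (PySem.Str.len s ≤ u))) 4 (3 - PySem.Str.len t) []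
        (by omega) (by omega)]
  · rw [if_neg h3, if_neg h3]
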